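-- pv_equiv track=rewrite | github.com/rehmanul/CAD-Analyzer-Pro | installer/CAD_Analyzer_Pro_Installer/CAD_Analyzer_Pro/_internal/utils/island_box_optimizer.py | _get_related_room_types
-- ===== SOURCE A (Python) =====
-- from typing import Dict, List, Any, Tuple, Optional
--
-- def _get_related_room_types(box_type: str) -> List[str]:
--     """Get room types that should be clustered together"""
--     clusters = {
--         'bedrooms': ['hotel_room_single', 'hotel_room_double', 'hotel_room_suite'],
--         'bathrooms': ['bathroom_standard', 'bathroom_accessible'],
--         'kitchens': ['kitchen_compact', 'kitchen_full'],
--         'living': ['living_small', 'living_large'],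
--         'offices': ['office_single', 'office_double'],
--         'storage': ['storage_small', 'storage_large']
--     }
--
--     for cluster_name, room_types in clusters.items():
--         if box_type in room_types:
--             return room_types
--
--     return []
-- ===== SOURCE B (Python) =====
-- def _get_related_room_types(box_type: str) -> "List[str]":
--     """Get room types that should be clustered together"""
--     clusters = {
--         'bedrooms': ['hotel_room_single', 'hotel_room_double', 'hotel_room_suite'],
--         'bathrooms': ['bathroom_standard', 'bathroom_accessible'],
--         'kitchens': ['kitchen_compact', 'kitchen_full'],
--         'living': ['living_small', 'living_large'],
--         'offices': ['office_single', 'office_double'],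
--         'storage': ['storage_small', 'storage_large']
--     }
--     reverse = {rt: room_types for room_types in clusters.values() for rt in room_types}
--     return reverse.get(box_type, [])
-- ===== Notes on version B (the rewrite author's own statement) =====
-- stated objective: idiomatic
-- what changed: B builds a reverse lookup dict mapping each room type to its cluster list and answers with a single reverse.get(box_type, []), replacing A's per-cluster loop with membership scan and early return.
import Mathlib
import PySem

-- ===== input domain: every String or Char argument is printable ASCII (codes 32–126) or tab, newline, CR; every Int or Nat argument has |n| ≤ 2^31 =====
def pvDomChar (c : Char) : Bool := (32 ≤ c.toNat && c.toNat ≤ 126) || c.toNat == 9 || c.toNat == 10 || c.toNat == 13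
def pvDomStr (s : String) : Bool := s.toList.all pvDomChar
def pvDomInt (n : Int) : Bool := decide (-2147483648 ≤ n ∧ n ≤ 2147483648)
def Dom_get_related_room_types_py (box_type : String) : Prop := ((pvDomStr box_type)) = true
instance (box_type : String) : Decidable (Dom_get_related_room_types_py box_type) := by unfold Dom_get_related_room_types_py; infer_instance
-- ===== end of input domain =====

-- B replaces A's per-cluster scan-and-return loop with a reverse dict (room type -> cluster list) built once, then one lookup (objective: idiomatic).
-- ===== PORT A =====
def pvClusters : List (String × List String) :=
  [("bedrooms", ["hotel_room_single", "hotel_room_double", "hotel_room_suite"]),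
   ("bathrooms", ["bathroom_standard", "bathroom_accessible"]),
   ("kitchens", ["kitchen_compact", "kitchen_full"]),
   ("living", ["living_small", "living_large"]),
   ("offices", ["office_single", "office_double"]),
   ("storage", ["storage_small", "storage_large"])]

-- the for-loop over clusters.items() with early return
def pvScanA (box_type : String) : List (String × List String) → List String
  | [] => []
  | (_, room_types) :: rest =>
      if box_type ∈ room_types then room_types else pvScanA box_type rest

def get_related_room_types_py (box_type : String) : List String :=
  pvScanA box_type pvClusters

-- ===== PORT B =====
-- reverse = {rt: room_types for room_types in clusters.values() for rt in room_types}
def pvReverseB : PySem.Dict String (List String) :=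
  pvClusters.foldl (fun d p => p.2.foldl (fun d rt => d.insert rt p.2) d) PySem.Dict.empty

def get_related_room_types_py_alt (box_type : String) : List String :=
  pvReverseB.getD box_type []

-- ===== PRECONDITION & SPEC =====
def Spec_get_related_room_types_py (box_type : String) (out : List String) : Prop := out = get_related_room_types_py_alt box_type
instance (box_type : String) (out : List String) : Decidable (Spec_get_related_room_types_py box_type out) := by unfold Spec_get_related_room_types_py; infer_instance

-- ===== CLAIM (what is proved, stated in full; the proofs are below) =====
def Claim_equal_get_related_room_types_py : Prop := ∀ (box_type : String), Dom_get_related_room_types_py box_type → Spec_get_related_room_types_py box_type (get_related_room_types_py box_type)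

-- ===== LEMMAS AND PROOFS =====
theorem pv_agree (box_type : String) :
    get_related_room_types_py box_type = get_related_room_types_py_alt box_type := by
  by_cases h1 : box_type = "hotel_room_single"; · subst h1; decide
  by_cases h2 : box_type = "hotel_room_double"; · subst h2; decide
  by_cases h3 : box_type = "hotel_room_suite"; · subst h3; decide
  by_cases h4 : box_type = "bathroom_standard"; · subst h4; decide
  by_cases h5 : box_type = "bathroom_accessible"; · subst h5; decide
  by_cases h6 : box_type = "kitchen_compact"; · subst h6; decide
  by_cases h7 : box_type = "kitchen_full"; · subst h7; decide
  by_cases h8 : box_type = "living_small"; · subst h8; decide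
  by_cases h9 : box_type = "living_large"; · subst h9; decide
  by_cases h10 : box_type = "office_single"; · subst h10; decide
  by_cases h11 : box_type = "office_double"; · subst h11; decide
  by_cases h12 : box_type = "storage_small"; · subst h12; decide
  by_cases h13 : box_type = "storage_large"; · subst h13; decide
  -- box_type is none of the room types: both sides return []
  simp [get_related_room_types_py, get_related_room_types_py_alt, pvScanA, pvClusters,
        pvReverseB, PySem.Dict.empty, PySem.Dict.getD, PySem.Dict.get?, PySem.Dict.insert,
        beq_iff_eq, h1, h2, h3, h4, h5, h6, h7, h8, h9, h10, h11, h12, h13,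
        Ne.symm h1, Ne.symm h2, Ne.symm h3, Ne.symm h4, Ne.symm h5, Ne.symm h6, Ne.symm h7,
        Ne.symm h8, Ne.symm h9, Ne.symm h10, Ne.symm h11, Ne.symm h12, Ne.symm h13]

-- ===== VERDICT (by name: the statement is the Claim_ definition above) =====
theorem get_related_room_types_py_spec : Claim_equal_get_related_room_types_py := by
  intro box_type _
  unfold Spec_get_related_room_types_py
  exact pv_agree box_type
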